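-- pv_equiv track=rewrite | github.com/eleanorcuallado/brawn | tools/data.py | get_class_spike_number
-- ===== SOURCE A (Python) =====
-- def get_class_spike_number(spikes, class_size, class_amount):
--     """
--     Returns the number of spiking neurons per class.
--
--     Parameters
--     ----------
--     spikes: list of int
--         Number of spikes per neuron.
--     class_size: int
--         Number of neurons per class.
--     class_amount: int
--         Number of classes.
--
--     Returnss
--     -------
--     spike_amounts: list of int
--         Number of spiking neurons per class.
--     """
--     numbers = []
--     for class_id in range(class_amount):
--         spiking = 0
--         for i in range(class_size):
--             if spikes[class_id * class_size + i] > 0: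
--                 spiking += 1
--         numbers.append(spiking)
--
--     return numbers
-- ===== SOURCE B (Python) =====
-- def get_class_spike_number(spikes, class_size, class_amount):
--     # Stage 1: cumulative count of spiking neurons; prefix[k] = #spiking among first k.
--     prefix = [0]
--     for v in spikes:
--         prefix.append(prefix[-1] + (1 if v > 0 else 0))
--     # Stage 2: each class count is a difference of two prefix sums.
--     return [prefix[(c + 1) * class_size] - prefix[c * class_size]
--             for c in range(class_amount)]
-- ===== Notes on version B (the rewrite author's own statement) =====
-- stated objective: alternative
-- what changed: Replaces A's per-class counting loops by a two-stage prefix-sum algorithm: one pass builds the cumulative count of spiking neurons, then each class count is obtained as a difference of two prefix sums.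
-- outside the precondition, e.g. on get_class_spike_number([1, 2], -1, 2): A returns [0, 0], B returns [2, -1]
import Mathlib
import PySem

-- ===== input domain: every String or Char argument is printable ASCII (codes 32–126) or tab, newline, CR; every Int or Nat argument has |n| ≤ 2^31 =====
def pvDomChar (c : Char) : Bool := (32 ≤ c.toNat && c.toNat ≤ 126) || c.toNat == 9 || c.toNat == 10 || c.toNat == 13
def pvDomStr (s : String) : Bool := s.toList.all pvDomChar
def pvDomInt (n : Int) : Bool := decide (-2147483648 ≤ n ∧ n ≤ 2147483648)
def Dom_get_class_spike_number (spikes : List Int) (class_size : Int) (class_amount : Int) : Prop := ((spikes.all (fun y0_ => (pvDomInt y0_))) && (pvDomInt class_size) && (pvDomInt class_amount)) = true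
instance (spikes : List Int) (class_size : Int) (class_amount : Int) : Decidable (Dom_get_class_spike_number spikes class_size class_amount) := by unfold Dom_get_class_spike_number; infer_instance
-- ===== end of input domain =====

-- B replaces A's per-class counting loops by a two-stage prefix-sum algorithm: one pass builds
-- the cumulative count of spiking neurons, then each class count is a difference of two prefix
-- sums (objective: alternative).

-- ===== PORT A =====
def get_class_spike_number (spikes : List Int) (class_size : Int) (class_amount : Int) : List Int :=
  (PySem.List.pyRange 0 class_amount 1).foldl (fun numbers class_id =>
    numbers ++ [((PySem.List.pyRange 0 class_size 1).foldl (fun spiking i =>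
      if PySem.List.pyGetD spikes (class_id * class_size + i) 0 > 0 then spiking + 1 else spiking) 0)]) []

-- ===== PORT B =====
def get_class_spike_number_alt (spikes : List Int) (class_size : Int) (class_amount : Int) : List Int :=
  let pfx := spikes.foldl (fun p v =>
    p ++ [PySem.List.pyGetD p (-1) 0 + (if v > 0 then (1 : Int) else 0)]) [0]
  (PySem.List.pyRange 0 class_amount 1).map (fun c =>
    PySem.List.pyGetD pfx ((c + 1) * class_size) 0 - PySem.List.pyGetD pfx (c * class_size) 0)

-- ===== PRECONDITION & SPEC =====
-- Pre_ excludes (i) inputs where A raises IndexError (positive dimensions whose product exceeds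
-- len(spikes)), and (ii) negative class_size with positive class_amount, outside the function's
-- natural domain, where A's value [0]*class_amount is an artefact of its empty inner range while
-- B's negative prefix indices wrap Python-style.
def Pre_get_class_spike_number (spikes : List Int) (class_size : Int) (class_amount : Int) : Prop :=
  (0 ≤ class_size ∧ class_amount * class_size ≤ (spikes.length : Int)) ∨ class_amount ≤ 0
instance (spikes : List Int) (class_size : Int) (class_amount : Int) : Decidable (Pre_get_class_spike_number spikes class_size class_amount) := by unfold Pre_get_class_spike_number; infer_instance

def pvWitness_get_class_spike_number : List Int × Int × Int := ([1, 0, 2, 3, 0, 0], 2, 3)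

def Spec_get_class_spike_number (spikes : List Int) (class_size : Int) (class_amount : Int) (out : List Int) : Prop := out = get_class_spike_number_alt spikes class_size class_amount
instance (spikes : List Int) (class_size : Int) (class_amount : Int) (out : List Int) : Decidable (Spec_get_class_spike_number spikes class_size class_amount out) := by unfold Spec_get_class_spike_number; infer_instance

-- ===== CLAIM (what is proved, stated in full; the proofs are below) =====
def Claim_equal_get_class_spike_number : Prop := ∀ (spikes : List Int) (class_size : Int) (class_amount : Int), Dom_get_class_spike_number spikes class_size class_amount → Pre_get_class_spike_number spikes class_size class_amount → Spec_get_class_spike_number spikes class_size class_amount (get_class_spike_number spikes class_size class_amount)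

-- ===== LEMMAS AND PROOFS =====

-- number of spiking neurons among the first k of spikes
def pvCnt (sp : List Int) (k : Nat) : Int := ((sp.take k).countP (fun v => decide (0 < v)) : Int)

-- B's first pass builds exactly the table of pvCnt values.
lemma pv_prefix_eq (sp : List Int) :
    sp.foldl (fun p v => p ++ [PySem.List.pyGetD p (-1) 0 + (if v > 0 then (1 : Int) else 0)]) [0]
      = (List.range (sp.length + 1)).map (pvCnt sp) := by
  induction sp using List.reverseRecOn with
  | nil => simp [pvCnt]
  | append_singleton l x ih =>
    rw [List.foldl_append, List.foldl_cons, List.foldl_nil, ih]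
    have hsplit : (List.range (l.length + 1)).map (pvCnt l)
        = (List.range l.length).map (pvCnt l) ++ [pvCnt l l.length] := by
      rw [List.range_succ, List.map_append, List.map_singleton]
    rw [hsplit, PySem.List.pyGetD_neg_one_append_singleton]
    have hlen : (l ++ [x]).length + 1 = (l.length + 1) + 1 := by simp
    rw [hlen, List.range_succ, List.map_append, List.map_singleton, ← hsplit]
    have h1 : (List.range (l.length + 1)).map (pvCnt l)
        = (List.range (l.length + 1)).map (pvCnt (l ++ [x])) := by
      apply List.map_congr_left
      intro k hk
      rw [List.mem_range] at hk
      unfold pvCnt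
      rw [List.take_append_of_le_length (by omega)]
    have h2 : pvCnt l l.length + (if x > 0 then (1 : Int) else 0)
        = pvCnt (l ++ [x]) (l.length + 1) := by
      unfold pvCnt
      rw [List.take_of_length_le (by simp), List.take_of_length_le (by simp),
          List.countP_append]
      simp [List.countP_cons]
    rw [h1, h2]

-- A's inner loop over a block equals a difference of prefix counts (Nat form).
lemma pv_seg (sp : List Int) (a s : Nat) (h : a + s ≤ sp.length) :
    (List.range s).foldl (fun acc (k : Nat) =>
        if PySem.List.pyGetD sp ((a : Int) + (k : Int)) 0 > 0 then acc + 1 else acc) (0 : Int)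
      = pvCnt sp (a + s) - pvCnt sp a := by
  induction s with
  | zero => simp
  | succ s ih =>
    rw [List.range_succ, List.foldl_append, ih (by omega), List.foldl_cons, List.foldl_nil]
    have hgy : ((a : Int) + (s : Nat)) = ((a + s : Nat) : Int) := by push_cast; ring
    have hin : a + s < sp.length := by omega
    have hget : PySem.List.pyGetD sp ((a : Int) + (s : Nat)) 0 = sp[a + s] := by
      rw [hgy, PySem.List.pyGetD_natCast, List.getD_eq_getElem sp 0 hin]
    have hc : pvCnt sp (a + s + 1) = pvCnt sp (a + s) + (if 0 < sp[a + s] then (1 : Int) else 0) := by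
      unfold pvCnt
      rw [List.take_add_one, List.countP_append]
      have : sp[a + s]? = some sp[a + s] := List.getElem?_eq_getElem hin
      rw [this]
      simp [List.countP_cons]
    rw [hget]
    have harr : a + (s + 1) = a + s + 1 := by omega
    rw [harr, hc]
    split_ifs with hx
    · ring
    · ring

-- ===== VERDICT (by name: the statement is the Claim_ definition above) =====
theorem get_class_spike_number_spec : Claim_equal_get_class_spike_number := by
  intro sp cs ca _ hpre
  rcases hpre with ⟨hcs, hlen⟩ | hca
  case inr =>
    unfold Spec_get_class_spike_number get_class_spike_number get_class_spike_number_alt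
    rw [PySem.List.pyRange_one_eq_nil hca]
    simp
  unfold Spec_get_class_spike_number get_class_spike_number get_class_spike_number_alt
  rw [PySem.List.foldl_append_singleton_eq_map, pv_prefix_eq]
  apply List.map_congr_left
  intro c hc
  rw [PySem.List.mem_pyRange_one] at hc
  obtain ⟨hc0, hcca⟩ := hc
  -- bounds on the two flat indices
  have hnn : 0 ≤ c * cs := mul_nonneg hc0 hcs
  have hub : (c + 1) * cs ≤ ca * cs := mul_le_mul_of_nonneg_right (by omega) hcs
  have hub' : (c + 1) * cs ≤ (sp.length : Int) := le_trans hub hlen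
  have hsum : (c + 1) * cs = c * cs + cs := by ring
  -- name the Nat values of the indices
  have ha : ((c * cs).toNat : Int) = c * cs := Int.toNat_of_nonneg hnn
  have hs : (cs.toNat : Int) = cs := Int.toNat_of_nonneg hcs
  have hbound : (c * cs).toNat + cs.toNat ≤ sp.length := by omega
  -- A's inner loop
  have hA : (PySem.List.pyRange 0 cs 1).foldl (fun spiking i =>
        if PySem.List.pyGetD sp (c * cs + i) 0 > 0 then spiking + 1 else spiking) 0
      = pvCnt sp ((c * cs).toNat + cs.toNat) - pvCnt sp ((c * cs).toNat) := by
    rw [PySem.List.pyRange_one, List.foldl_map]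
    have := pv_seg sp (c * cs).toNat cs.toNat hbound
    rw [← this]
    simp only [ha, zero_add, sub_zero]
  rw [hA]
  -- B's entry
  have hgetP : ∀ (i : Int), 0 ≤ i → i ≤ (sp.length : Int) →
      PySem.List.pyGetD ((List.range (sp.length + 1)).map (pvCnt sp)) i 0 = pvCnt sp i.toNat := by
    intro i h0 hle
    have hi : (i.toNat : Int) = i := Int.toNat_of_nonneg h0
    rw [← hi, PySem.List.pyGetD_natCast]
    have hlt : i.toNat < ((List.range (sp.length + 1)).map (pvCnt sp)).length := by
      simp; omega
    rw [List.getD_eq_getElem _ 0 hlt]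
    simp
    congr 1
    omega
  rw [hgetP _ (by omega) hub', hgetP _ hnn (by omega)]
  have ht : ((c + 1) * cs).toNat = (c * cs).toNat + cs.toNat := by omega
  rw [ht]
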